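-- pv_equiv track=rewrite | github.com/JsnPost/Python-Assignment-4 | will_this_work.py | vowel_bonus_scorer
-- ===== SOURCE A (Python) =====
-- def vowel_bonus_scorer(word):
--     word = word.upper()
--     vowels = "AEIOU"
--     letterPoints = 0
--
--     for char in word:
--
--         if char in vowels:
--             letterPoints += 3
--         else:
--             letterPoints += 1
--
--     #      for point_value in VOWEL_BONUS:
--     #          if char in VOWEL_BONUS[point_value]:
--     #             letterPoints += point_value
--
--     return letterPoints
-- ===== SOURCE B (Python) =====
-- def vowel_bonus_scorer(word):
--     up = word.upper()
--     total = len(up)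
--     for v in "AEIOU":
--         total += 2 * up.count(v)
--     return total
-- ===== Notes on version B (the rewrite author's own statement) =====
-- stated objective: faster
-- what changed: Instead of A's per-character loop that branches +3/+1, B starts from len(word.upper()) and loops over the five vowels, adding 2*up.count(v) for each — the character-level branch-and-accumulate pass is replaced by five library substring-count scans plus the length.
import Mathlib
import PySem

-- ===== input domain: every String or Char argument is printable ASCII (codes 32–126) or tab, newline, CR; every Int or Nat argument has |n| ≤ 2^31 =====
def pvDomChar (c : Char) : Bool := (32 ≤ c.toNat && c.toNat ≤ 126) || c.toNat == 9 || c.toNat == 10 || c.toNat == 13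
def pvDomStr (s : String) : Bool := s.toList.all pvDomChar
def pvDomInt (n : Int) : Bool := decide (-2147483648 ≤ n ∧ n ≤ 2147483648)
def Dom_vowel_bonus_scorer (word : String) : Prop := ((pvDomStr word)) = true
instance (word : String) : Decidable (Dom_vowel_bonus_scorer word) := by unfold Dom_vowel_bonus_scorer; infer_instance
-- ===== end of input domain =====

-- B drops A's per-character branch-and-accumulate loop: it starts from the word's length and,
-- for each of the five vowels, adds 2 * up.count(vowel) — five library count scans, measured faster at large sizes in a timing run (objective: faster, constant factor).

-- ===== PORT A =====
-- for char in word: letterPoints += 3 if char in "AEIOU" else 1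
def vowel_bonus_scorer (word : String) : Int :=
  (PySem.Str.upper word).toList.foldl
    (fun letterPoints char =>
      if char ∈ ['A', 'E', 'I', 'O', 'U'] then letterPoints + 3 else letterPoints + 1) 0

-- ===== PORT B =====
-- total = len(up); for v in "AEIOU": total += 2 * up.count(v)
def vowel_bonus_scorer_alt (word : String) : Int :=
  let up := PySem.Str.upper word
  "AEIOU".toList.foldl
    (fun total v => total + 2 * (PySem.Str.count up (String.ofList [v]) : Int))
    (PySem.Str.len up)

-- ===== PRECONDITION & SPEC =====
def Spec_vowel_bonus_scorer (word : String) (out : Int) : Prop := out = vowel_bonus_scorer_alt word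
instance (word : String) (out : Int) : Decidable (Spec_vowel_bonus_scorer word out) := by unfold Spec_vowel_bonus_scorer; infer_instance

-- ===== CLAIM (what is proved, stated in full; the proofs are below) =====
def Claim_equal_vowel_bonus_scorer : Prop := ∀ (word : String), Dom_vowel_bonus_scorer word → Spec_vowel_bonus_scorer word (vowel_bonus_scorer word)

-- ===== LEMMAS AND PROOFS =====

-- Python's s.count(c) for a single character c is the character count.
theorem vbs_go_single (c : Char) (l : List Char) : ∀ acc,
    PySem.Chars.count.go [c] l.length l acc = acc + l.count c := by
  induction l with
  | nil => intro acc; simp [PySem.Chars.count.go]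
  | cons h t ih =>
    intro acc
    rw [List.length_cons]
    rw [show PySem.Chars.count.go [c] (t.length+1) (h::t) acc
        = if ([c].isPrefixOf (h::t)) then PySem.Chars.count.go [c] t.length (List.drop 1 (h::t)) (acc+1)
          else PySem.Chars.count.go [c] t.length t acc from rfl]
    by_cases hc : c = h
    · subst hc
      simp [List.isPrefixOf, ih]
      omega
    · simp [List.isPrefixOf, Ne.symm hc, ih, hc]

theorem vbs_count_singleton (s : String) (c : Char) :
    PySem.Str.count s (String.ofList [c]) = s.toList.count c := by
  rw [PySem.Str.count_eq]
  rw [String.toList_ofList]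
  unfold PySem.Chars.count
  simpa using vbs_go_single c s.toList 0

-- A's accumulation loop in closed form.
theorem vbs_foldl_closed (l : List Char) (acc : Int) :
    l.foldl (fun a c => if c ∈ ['A', 'E', 'I', 'O', 'U'] then a + 3 else a + 1) acc
      = acc + (l.length : Int)
        + 2 * ((l.countP (fun c => decide (c ∈ ['A', 'E', 'I', 'O', 'U']))) : Int) := by
  induction l generalizing acc with
  | nil => simp
  | cons c t ih =>
    simp only [List.foldl_cons, List.countP_cons]
    by_cases h : c ∈ ['A', 'E', 'I', 'O', 'U']
    · rw [if_pos h, ih]; simp [h]; ring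
    · rw [if_neg h, ih]; simp [h]; ring

-- Vowel count splits into the five per-vowel character counts.
theorem vbs_countP_split (l : List Char) :
    ((l.countP (fun c => decide (c ∈ ['A', 'E', 'I', 'O', 'U']))) : Int)
      = l.count 'A' + l.count 'E' + l.count 'I' + l.count 'O' + l.count 'U' := by
  induction l with
  | nil => simp
  | cons c t ih =>
    rw [List.countP_cons, List.count_cons, List.count_cons, List.count_cons,
      List.count_cons, List.count_cons]
    push_cast
    rw [ih]
    by_cases h : c ∈ ['A', 'E', 'I', 'O', 'U']
    · simp only [List.mem_cons, List.not_mem_nil, or_false] at h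
      rcases h with rfl | rfl | rfl | rfl | rfl <;> simp <;> ring
    · simp only [List.mem_cons, List.not_mem_nil, or_false] at h
      push Not at h
      obtain ⟨h1, h2, h3, h4, h5⟩ := h
      simp [h1, h2, h3, h4, h5]

-- ===== VERDICT (by name: the statement is the Claim_ definition above) =====
theorem vowel_bonus_scorer_spec : Claim_equal_vowel_bonus_scorer := by
  intro word _
  unfold Spec_vowel_bonus_scorer vowel_bonus_scorer vowel_bonus_scorer_alt
  rw [vbs_foldl_closed, vbs_countP_split]
  have hA : ("AEIOU".toList) = ['A', 'E', 'I', 'O', 'U'] := rfl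
  simp only [hA, List.foldl_cons, List.foldl_nil, vbs_count_singleton, PySem.Str.len_eq]
  ring
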